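-- pv_equiv track=rewrite | github.com/Lilja/advent-of-code | 2021-12-01/algo.py | measurement_window_sumarizer
-- ===== SOURCE A (Python) =====
-- def measurement_window_sumarizer(items):
--     output = {}
--
--     current = 0
--     for idx, _ in enumerate(items):
--         if len(items) > idx + 2:
--             curr, n, nn = items[idx], items[idx+1], items[idx+2]
--             output[current] = int(curr) + int(n) + int(nn)
--         current = current+1
--
--     keys = sorted(output.keys())
--     results = []
--     for item in keys:
--         results.append(output[item])
--
--     return results
-- ===== SOURCE B (Python) =====
-- def measurement_window_sumarizer(items):
--     # prefix sums, then difference P[i+3]-P[i]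
--     P = [0]
--     for x in items:
--         P.append(P[-1] + int(x))
--     return [P[i + 3] - P[i] for i in range(len(items) - 2)]
-- ===== Notes on version B (the rewrite author's own statement) =====
-- stated objective: alternative
-- what changed: Replaces the dict-of-window-sums built by triple indexing plus a key-sort-and-collect pass with a one-pass prefix-sum table followed by a differencing comprehension.
import Mathlib
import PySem

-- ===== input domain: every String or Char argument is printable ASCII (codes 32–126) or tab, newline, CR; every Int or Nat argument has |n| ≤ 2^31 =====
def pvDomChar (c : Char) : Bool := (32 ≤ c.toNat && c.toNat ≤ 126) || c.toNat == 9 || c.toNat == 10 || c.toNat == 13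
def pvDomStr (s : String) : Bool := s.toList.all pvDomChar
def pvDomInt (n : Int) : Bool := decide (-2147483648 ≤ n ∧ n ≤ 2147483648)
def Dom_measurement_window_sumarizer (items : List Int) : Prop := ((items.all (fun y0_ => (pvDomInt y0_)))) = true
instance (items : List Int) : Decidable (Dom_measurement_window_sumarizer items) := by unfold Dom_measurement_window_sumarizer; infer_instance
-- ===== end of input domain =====

-- B replaces A's dict of triple-indexed window sums (then sort keys, collect) by a prefix-sum table and a differencing pass; objective: alternative decomposition.

-- ===== PORT A =====
def measurement_window_sumarizer (items : List Int) : List Int :=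
  -- output = {}; current = 0; for idx, _ in enumerate(items): ...
  let st := (PySem.List.enumerate items).foldl
    (fun (st : PySem.Dict Int Int × Int) (p : Int × Int) =>
      let output := st.1
      let current := st.2
      let output :=
        if (items.length : Int) > p.1 + 2 then
          -- curr, n, nn = items[idx], items[idx+1], items[idx+2]  (indices in range by the guard)
          let curr := PySem.List.pyGetD items p.1 0
          let n := PySem.List.pyGetD items (p.1 + 1) 0
          let nn := PySem.List.pyGetD items (p.1 + 2) 0
          output.insert current (curr + n + nn)
        else output
      (output, current + 1))
    (PySem.Dict.empty, 0)
  let output := st.1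
  let keys := PySem.List.sorted output.keys (fun k => k) false
  -- results = []; for item in keys: results.append(output[item])  (key always present)
  keys.foldl (fun results item => results ++ [output.getD item 0]) []

-- ===== PORT B =====
def measurement_window_sumarizer_alt (items : List Int) : List Int :=
  -- P = [0]; for x in items: P.append(P[-1] + int(x))
  let P := items.foldl (fun (P : List Int) x => P ++ [PySem.List.pyGetD P (-1) 0 + x]) [0]
  -- [P[i+3] - P[i] for i in range(len(items)-2)]
  (PySem.List.pyRange 0 ((items.length : Int) - 2) 1).map
    (fun i => PySem.List.pyGetD P (i + 3) 0 - PySem.List.pyGetD P i 0)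

-- ===== PRECONDITION & SPEC =====
def Spec_measurement_window_sumarizer (items : List Int) (out : List Int) : Prop := out = measurement_window_sumarizer_alt items
instance (items : List Int) (out : List Int) : Decidable (Spec_measurement_window_sumarizer items out) := by unfold Spec_measurement_window_sumarizer; infer_instance

-- ===== CLAIM (what is proved, stated in full; the proofs are below) =====
def Claim_equal_measurement_window_sumarizer : Prop := ∀ (items : List Int), Dom_measurement_window_sumarizer items → Spec_measurement_window_sumarizer items (measurement_window_sumarizer items)

-- ===== LEMMAS AND PROOFS =====

-- the window sum at index j, as both programs compute it
def pvW (items : List Int) (j : Int) : Int :=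
  PySem.List.pyGetD items j 0 + PySem.List.pyGetD items (j + 1) 0 + PySem.List.pyGetD items (j + 2) 0

-- A's loop body, with the enumerate pair replaced by its index
def pvStep (items : List Int) (st : PySem.Dict Int Int × Int) (j : Int) : PySem.Dict Int Int × Int :=
  (if (items.length : Int) > j + 2 then st.1.insert st.2 (pvW items j) else st.1, st.2 + 1)

def pvIns (items : List Int) (d : PySem.Dict Int Int) (j : Int) : PySem.Dict Int Int :=
  d.insert j (pvW items j)

lemma pvA_fold (items : List Int) (m : Nat) :
    (PySem.List.pyRange 0 (m : Int) 1).foldl (pvStep items) (PySem.Dict.empty, 0) =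
      ((PySem.List.pyRange 0 (min (m : Int) ((items.length : Int) - 2)) 1).foldl
        (pvIns items) PySem.Dict.empty, (m : Int)) := by
  induction m with
  | zero =>
    rw [PySem.List.pyRange_one_eq_nil (by simp), PySem.List.pyRange_one_eq_nil (by omega)]
    rfl
  | succ m ih =>
    have hm : ((m + 1 : Nat) : Int) = (m : Int) + 1 := by push_cast; ring
    rw [hm, PySem.List.pyRange_one_succ_right (Int.natCast_nonneg m), List.foldl_append, ih]
    simp only [List.foldl_cons, List.foldl_nil, pvStep]
    by_cases h : (m : Int) < (items.length : Int) - 2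
    · rw [if_pos (by omega), min_eq_left (by omega), min_eq_left (by omega),
        PySem.List.pyRange_one_succ_right (Int.natCast_nonneg m), List.foldl_append]
      rfl
    · rw [if_neg (by omega), show min ((m : Int) + 1) ((items.length : Int) - 2)
        = min (m : Int) ((items.length : Int) - 2) by omega]

lemma pvIns_getD (items : List Int) (l : List Int) (d : PySem.Dict Int Int) (j : Int) :
    (l.foldl (pvIns items) d).getD j 0 = if j ∈ l then pvW items j else d.getD j 0 := by
  induction l generalizing d with
  | nil => simp
  | cons x xs ih =>
    simp only [List.foldl_cons, pvIns, ih, PySem.Dict.getD_insert, List.mem_cons]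
    by_cases hxs : j ∈ xs <;> by_cases hx : j = x <;> simp [hxs, hx]

lemma pvIns_keys (items : List Int) (l : List Int) (d : PySem.Dict Int Int)
    (hd : ∀ j ∈ l, d.contains j = false) (hl : l.Nodup) :
    (l.foldl (pvIns items) d).keys = d.keys ++ l := by
  induction l generalizing d with
  | nil => simp
  | cons x xs ih =>
    simp only [List.foldl_cons, pvIns]
    rw [ih _ ?_ (List.nodup_cons.mp hl).2,
      PySem.Dict.keys_insert_of_not_contains d _ (hd x (by simp))]
    · simp
    · intro j hj
      rw [PySem.Dict.contains_insert]
      have hjx : j ≠ x := by rintro rfl; exact (List.nodup_cons.mp hl).1 hj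
      simp [hjx, hd j (List.mem_cons_of_mem _ hj)]

lemma pvA_eq (items : List Int) :
    measurement_window_sumarizer items =
      (PySem.List.pyRange 0 ((items.length : Int) - 2) 1).map (pvW items) := by
  unfold measurement_window_sumarizer
  rw [PySem.List.enumerate_eq_map_pyRange items 0, List.foldl_map, PySem.List.len_eq]
  simp only []
  have hfold : (PySem.List.pyRange 0 ((items.length : Int)) 1).foldl
      (fun (x : PySem.Dict Int Int × Int) (y : Int) =>
        (if (items.length : Int) > y + 2 then
          x.1.insert x.2 (PySem.List.pyGetD items y 0 + PySem.List.pyGetD items (y + 1) 0 +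
            PySem.List.pyGetD items (y + 2) 0)
        else x.1, x.2 + 1)) (PySem.Dict.empty, 0)
      = ((PySem.List.pyRange 0 (min ((items.length : Int)) ((items.length : Int) - 2)) 1).foldl
        (pvIns items) PySem.Dict.empty, ((items.length : Int))) := pvA_fold items items.length
  simp only [hfold, show min ((items.length : Int)) ((items.length : Int) - 2)
    = (items.length : Int) - 2 by omega]
  have hkeys := pvIns_keys items (PySem.List.pyRange 0 ((items.length : Int) - 2) 1)
    PySem.Dict.empty (fun j _ => PySem.Dict.contains_empty j) (PySem.List.nodup_pyRange_one 0 _)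
  rw [PySem.Dict.keys_empty, List.nil_append] at hkeys
  rw [hkeys,
    PySem.List.sorted_eq_of_perm_of_pairwise_lt _ _ _ (List.Perm.refl _)
      (PySem.List.pairwise_lt_pyRange_one 0 _),
    PySem.List.foldl_append_singleton_eq_map, List.nil_append]
  refine List.map_congr_left (fun j hj => ?_)
  rw [pvIns_getD items _ PySem.Dict.empty j, if_pos hj]

def pvPref : List Int → Int → List Int
  | [], acc => [acc]
  | x :: xs, acc => acc :: pvPref xs (acc + x)

lemma pvPref_fold (items : List Int) (Q : List Int) (acc : Int) :
    items.foldl (fun (P : List Int) x => P ++ [PySem.List.pyGetD P (-1) 0 + x]) (Q ++ [acc])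
      = Q ++ pvPref items acc := by
  induction items generalizing Q acc with
  | nil => simp [pvPref]
  | cons x xs ih =>
    simp only [List.foldl_cons, PySem.List.pyGetD_neg_one_append_singleton]
    rw [ih (Q ++ [acc]) (acc + x)]
    simp [pvPref]

lemma pvPref_getD (items : List Int) (acc : Int) (k : Nat) (hk : k ≤ items.length) :
    (pvPref items acc).getD k 0 = acc + (items.take k).sum := by
  induction items generalizing acc k with
  | nil =>
    have : k = 0 := by simpa using hk
    simp [this, pvPref]
  | cons x xs ih =>
    cases k with
    | zero => simp [pvPref]
    | succ k =>
      simp only [pvPref, List.getD_cons_succ, List.take_succ_cons, List.sum_cons]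
      rw [ih (acc + x) k (by simpa using hk)]
      ring

lemma pvTake_succ_sum (l : List Int) (k : Nat) :
    (l.take (k + 1)).sum = (l.take k).sum + l.getD k 0 := by
  rw [List.take_add_one, List.sum_append, List.getD_eq_getElem?_getD]
  cases h : l[k]? <;> simp_all

lemma pvB_eq (items : List Int) :
    measurement_window_sumarizer_alt items =
      (PySem.List.pyRange 0 ((items.length : Int) - 2) 1).map (pvW items) := by
  unfold measurement_window_sumarizer_alt
  have hP : items.foldl (fun (P : List Int) x => P ++ [PySem.List.pyGetD P (-1) 0 + x]) [0]
      = pvPref items 0 := by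
    simpa using pvPref_fold items [] 0
  rw [hP]
  refine List.map_congr_left (fun i hi => ?_)
  rw [PySem.List.mem_pyRange_one] at hi
  obtain ⟨h0, h2⟩ := hi
  rw [PySem.List.pyGetD_of_nonneg _ 0 (show (0 : Int) ≤ i + 3 by omega),
    PySem.List.pyGetD_of_nonneg _ 0 h0,
    pvPref_getD items 0 _ (by omega), pvPref_getD items 0 _ (by omega)]
  rw [show (i + 3).toNat = i.toNat + 3 by omega,
    show i.toNat + 3 = (i.toNat + 2) + 1 from rfl, pvTake_succ_sum,
    show i.toNat + 2 = (i.toNat + 1) + 1 from rfl, pvTake_succ_sum, pvTake_succ_sum]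
  unfold pvW
  rw [PySem.List.pyGetD_of_nonneg _ 0 h0,
    PySem.List.pyGetD_of_nonneg _ 0 (show (0 : Int) ≤ i + 1 by omega),
    PySem.List.pyGetD_of_nonneg _ 0 (show (0 : Int) ≤ i + 2 by omega),
    show (i + 1).toNat = i.toNat + 1 by omega, show (i + 2).toNat = i.toNat + 2 by omega]
  ring

-- ===== VERDICT (by name: the statement is the Claim_ definition above) =====
theorem measurement_window_sumarizer_spec : Claim_equal_measurement_window_sumarizer := by
  intro items _
  unfold Spec_measurement_window_sumarizer
  rw [pvA_eq, pvB_eq]
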